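-- pv_equiv track=rewrite | github.com/tomsim/ByteMachine | ByteCPU/assembler/byteasm.py | evaluate
-- ===== SOURCE A (Python) =====
-- def evaluate(identifiers, s):
--     if s in identifiers:
--         return identifiers[s]
--     elif len(s)>0 and s[0]=='.':
--         return evaluate(identifiers, s[1:]) & 0xff
--     elif len(s)>0 and s[0]=='^':
--         return (evaluate(identifiers, s[1:]) >> 8) & 0xff
--     elif len(s)>0 and s[0]=='$':
--         return int(s[1:], 16)
--     else:
--         return int(s,10)
-- ===== SOURCE B (Python) =====
-- def evaluate(identifiers, s):
--     # Stage 1: find the cut index j past the leading '.'/'^' operators,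
--     # stopping early if some suffix is itself a known identifier.
--     j = 0
--     while s[j:] not in identifiers and j < len(s) and s[j] in '.^':
--         j += 1
--     # Stage 2: base value of the remaining suffix.
--     rest = s[j:]
--     if rest in identifiers:
--         v = identifiers[rest]
--     elif rest.startswith('$'):
--         v = int(rest[1:], 16)
--     else:
--         v = int(rest, 10)
--     # Stage 3: apply the peeled operators innermost-first.
--     for c in reversed(s[:j]):
--         v = v & 0xff if c == '.' else (v >> 8) & 0xff
--     return v
-- ===== Notes on version B (the rewrite author's own statement) =====
-- stated objective: alternative
-- what changed: Replaced recursion over string suffixes by three staged passes: compute a cut index past the leading '.'/'^' operators, evaluate the base value of the remaining suffix once, then fold the peeled operator characters over it in reverse order.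
import Mathlib
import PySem

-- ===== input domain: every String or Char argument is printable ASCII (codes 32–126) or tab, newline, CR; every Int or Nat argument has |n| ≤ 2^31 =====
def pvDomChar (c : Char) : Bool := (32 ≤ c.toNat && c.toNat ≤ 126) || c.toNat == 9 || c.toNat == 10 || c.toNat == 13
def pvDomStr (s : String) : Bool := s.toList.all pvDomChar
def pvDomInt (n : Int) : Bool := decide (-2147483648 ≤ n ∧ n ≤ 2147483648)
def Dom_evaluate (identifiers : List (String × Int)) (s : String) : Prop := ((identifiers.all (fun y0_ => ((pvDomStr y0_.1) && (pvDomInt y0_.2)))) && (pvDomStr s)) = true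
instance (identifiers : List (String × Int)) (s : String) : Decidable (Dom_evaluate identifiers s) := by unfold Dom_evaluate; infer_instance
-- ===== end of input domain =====

-- B replaces A's recursion over suffixes by three staged passes: find the cut index past the
-- leading '.'/'^' operators, evaluate the base value of the suffix once, then fold the peeled
-- operator characters over it in reverse (alternative decomposition, same cost).

-- ===== PORT A =====
-- A, recursion over the suffix; int(...) raises (ValueError) are excluded by Pre_evaluate,
-- there the getD 0 default is never reached.
def evalA (ids : List (String × Int)) (cs : List Char) : Int :=
    match (PySem.Dict.mk ids).get? (String.ofList cs) with
    | some v => v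
    | none =>
      match cs with
      | [] => (PySem.Int.ofChars? ([] : List Char)).getD 0
      | c :: r =>
        if c = '.' then PySem.Int.band (evalA ids r) 255
        else if c = '^' then PySem.Int.band ((evalA ids r) >>> 8) 255
        else if c = '$' then (PySem.Int.ofCharsBase? r 16).getD 0
        else (PySem.Int.ofChars? (c :: r)).getD 0

def evaluate (identifiers : List (String × Int)) (s : String) : Int :=
  evalA identifiers s.toList

-- ===== PORT B =====
-- Stage 1 (B's while loop): how many leading '.'/'^' chars to peel, stopping early
-- as soon as some suffix is a key of identifiers.
def cutLen (ids : List (String × Int)) (cs : List Char) : Nat :=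
  if ((PySem.Dict.mk ids).get? (String.ofList cs)).isSome then 0
  else
    match cs with
    | [] => 0
    | c :: r => if c = '.' ∨ c = '^' then cutLen ids r + 1 else 0

-- Stage 2: base value of the remaining suffix.
def baseVal (ids : List (String × Int)) (rest : List Char) : Int :=
  match (PySem.Dict.mk ids).get? (String.ofList rest) with
  | some v => v
  | none =>
    match rest with
    | '$' :: t => (PySem.Int.ofCharsBase? t 16).getD 0
    | _ => (PySem.Int.ofChars? rest).getD 0

-- Stage 3: the body of B's `for c in reversed(s[:j])` loop.
def applyOp (v : Int) (c : Char) : Int :=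
  if c = '.' then PySem.Int.band v 255 else PySem.Int.band (v >>> 8) 255

def evaluate_alt (identifiers : List (String × Int)) (s : String) : Int :=
  let cs := s.toList
  let j := cutLen identifiers cs
  ((cs.take j).reverse).foldl applyOp (baseVal identifiers (cs.drop j))

-- ===== PRECONDITION & SPEC =====
-- Pre_ excludes exactly the inputs on which A raises ValueError from int(...): after the
-- run of leading '.'/'^' characters (peeling stops early if some suffix along it is a key
-- of identifiers), the remainder must be a valid int literal (hex after '$', else decimal).
def pvParseOK (r : List Char) : Bool :=
  match r with
  | '$' :: t => (PySem.Int.ofCharsBase? t 16).isSome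
  | _ => (PySem.Int.ofChars? r).isSome

def Pre_evaluate (identifiers : List (String × Int)) (s : String) : Prop :=
  (let cs := s.toList
   let run := (cs.takeWhile (fun c => c = '.' || c = '^')).length
   (List.range (run + 1)).any
       (fun j => ((PySem.Dict.mk identifiers).get? (String.ofList (cs.drop j))).isSome)
     || pvParseOK (cs.drop run)) = true
instance (identifiers : List (String × Int)) (s : String) : Decidable (Pre_evaluate identifiers s) := by
  unfold Pre_evaluate; infer_instance

def pvWitness_evaluate : (List (String × Int)) × String := ([("x", 5)], "^x")

def Spec_evaluate (identifiers : List (String × Int)) (s : String) (out : Int) : Prop := out = evaluate_alt identifiers s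
instance (identifiers : List (String × Int)) (s : String) (out : Int) : Decidable (Spec_evaluate identifiers s out) := by unfold Spec_evaluate; infer_instance

-- ===== CLAIM (what is proved, stated in full; the proofs are below) =====
def Claim_equal_evaluate : Prop := ∀ (identifiers : List (String × Int)) (s : String), Dom_evaluate identifiers s → Pre_evaluate identifiers s → Spec_evaluate identifiers s (evaluate identifiers s)

-- ===== LEMMAS AND PROOFS =====

theorem staged_spec (ids : List (String × Int)) :
    ∀ (cs : List Char),
      ((cs.take (cutLen ids cs)).reverse).foldl applyOp
          (baseVal ids (cs.drop (cutLen ids cs)))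
        = evalA ids cs := by
  intro cs
  induction cs with
  | nil =>
    simp only [cutLen, evalA, baseVal]
    cases h : (PySem.Dict.mk ids).get? (String.ofList []) <;> simp [h]
  | cons c r ih =>
    simp only [cutLen, evalA]
    cases h : (PySem.Dict.mk ids).get? (String.ofList (c :: r)) with
    | some v => simp [baseVal, h]
    | none =>
      simp only [Option.isSome_none, Bool.false_eq_true, if_false]
      by_cases h1 : c = '.'
      · simp only [h1, true_or, if_pos, List.take_succ_cons, List.drop_succ_cons,
          List.reverse_cons, List.foldl_append, List.foldl_cons, List.foldl_nil]
        rw [ih]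
        simp [applyOp]
      · by_cases h2 : c = '^'
        · simp only [h2, or_true, if_pos, List.take_succ_cons, List.drop_succ_cons,
            List.reverse_cons, List.foldl_append, List.foldl_cons, List.foldl_nil]
          rw [ih]
          simp [applyOp]
        · have hno : ¬ (c = '.' ∨ c = '^') := by tauto
          simp only [hno, if_false, List.take_zero, List.drop_zero, List.reverse_nil,
            List.foldl_nil, baseVal, h]
          by_cases h3 : c = '$'
          · subst h3; simp
          · cases hc : c; simp_all [baseVal]

-- ===== VERDICT (by name: the statement is the Claim_ definition above) =====
theorem evaluate_spec : Claim_equal_evaluate := by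
  intro identifiers s _ _
  unfold Spec_evaluate evaluate evaluate_alt
  exact (staged_spec identifiers s.toList).symm
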